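-- pv_equiv track=rewrite | github.com/luckyprc/tvbox | fetch_tvbox.py | is_ad_parse
-- ===== SOURCE A (Python) =====
-- AD_KEYWORDS = [
--     "广告", "推广", "公告", "购物", "商城", "彩票", "博彩", "投注",
--     "ad", "advert", "ads", "shopping", "mall", "lottery", "bet",
--     "banner", "popup", "推广", "营销", "affiliate", "赚钱", "返利",
--     "任务", "签到", "积分", "vip", "会员", "充值", "支付"
-- ]
--
-- def is_ad_parse(parse):
--     if not isinstance(parse, dict):
--         return True
--     name = str(parse.get("name", "")).lower()
--     url = str(parse.get("url", "")).lower()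
--     for kw in AD_KEYWORDS:
--         if kw.lower() in name or kw.lower() in url:
--             return True
--     return False
-- ===== SOURCE B (Python) =====
-- AD_KEYWORDS = [
--     "广告", "推广", "公告", "购物", "商城", "彩票", "博彩", "投注",
--     "ad", "advert", "ads", "shopping", "mall", "lottery", "bet",
--     "banner", "popup", "推广", "营销", "affiliate", "赚钱", "返利",
--     "任务", "签到", "积分", "vip", "会员", "充值", "支付"
-- ]
--
-- # Precompiled once: lowered keywords bucketed by their first character.
-- _BUCKETS = {}
-- for _kw in AD_KEYWORDS:
--     _k = _kw.lower()
--     _BUCKETS[_k[0]] = _BUCKETS.get(_k[0], []) + [_k]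
--
--
-- def _hit(text):
--     # One left-to-right pass: at each position, only the keywords whose
--     # first character matches are tried as a prefix.
--     for i, c in enumerate(text):
--         for k in _BUCKETS.get(c, []):
--             if text.startswith(k, i):
--                 return True
--     return False
--
--
-- def is_ad_parse(parse):
--     if not isinstance(parse, dict):
--         return True
--     return _hit(str(parse.get("name", "")).lower()) or _hit(str(parse.get("url", "")).lower())
-- ===== Notes on version B (the rewrite author's own statement) =====
-- stated objective: alternative
-- what changed: A loops over the keywords doing a substring scan of name and url per keyword; B precompiles the lowered keywords once into a dict bucketed by first character and makes a single left-to-right position scan of each string, trying only the matching bucket as a prefix at each position.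
import Mathlib
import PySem

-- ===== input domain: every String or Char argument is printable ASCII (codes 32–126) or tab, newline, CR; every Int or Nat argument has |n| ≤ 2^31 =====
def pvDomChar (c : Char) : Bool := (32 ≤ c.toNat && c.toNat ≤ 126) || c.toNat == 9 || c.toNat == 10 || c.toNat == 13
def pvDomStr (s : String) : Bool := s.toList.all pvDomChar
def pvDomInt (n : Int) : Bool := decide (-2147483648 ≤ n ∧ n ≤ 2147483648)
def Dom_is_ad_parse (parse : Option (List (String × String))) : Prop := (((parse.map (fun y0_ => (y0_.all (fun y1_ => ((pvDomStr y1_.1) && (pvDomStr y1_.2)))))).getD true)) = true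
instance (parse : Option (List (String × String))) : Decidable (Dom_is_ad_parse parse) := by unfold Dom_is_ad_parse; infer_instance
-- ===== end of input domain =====

-- B replaces A's keyword-major loop of substring scans by one precompiled first-char
-- bucket index and a single left-to-right position scan of each string (objective:
-- alternative traversal/data structure; same asymptotic cost).

-- ===== PORT A =====
def pvADKeywords : List String := [
    "广告", "推广", "公告", "购物", "商城", "彩票", "博彩", "投注",
    "ad", "advert", "ads", "shopping", "mall", "lottery", "bet",
    "banner", "popup", "推广", "营销", "affiliate", "赚钱", "返利",
    "任务", "签到", "积分", "vip", "会员", "充值", "支付"]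

-- A's 'for kw in AD_KEYWORDS: if kw.lower() in name or kw.lower() in url: return True'
def pvAdLoopA (kws : List String) (name url : List Char) : Bool :=
  match kws with
  | [] => false
  | kw :: rest =>
    if PySem.Chars.isIn (PySem.Chars.lower kw.toList) name
       || PySem.Chars.isIn (PySem.Chars.lower kw.toList) url then true
    else pvAdLoopA rest name url

def is_ad_parse (parse : Option (List (String × String))) : Bool :=
  match parse with
  | none => true               -- not a dict
  | some d =>
    -- str() around parse.get is the identity here (values are strings)
    let name := PySem.Chars.lower ((PySem.Dict.mk d).getD "name" "").toList
    let url  := PySem.Chars.lower ((PySem.Dict.mk d).getD "url" "").toList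
    pvAdLoopA pvADKeywords name url

-- ===== PORT B =====
-- the lowered keywords (Source B lowers each _kw once while building _BUCKETS)
def pvKWL : List (List Char) := pvADKeywords.map (fun s => PySem.Chars.lower s.toList)

-- _BUCKETS[_k[0]] = _BUCKETS.get(_k[0], []) + [_k]   (k[0] = headI; every keyword is nonempty)
def pvBuckets : PySem.Dict Char (List (List Char)) :=
  pvKWL.foldl (fun d k => d.modify k.headI [] (fun v => v ++ [k])) PySem.Dict.empty

-- _hit: for i, c in enumerate(text): for k in _BUCKETS.get(c, []): if text.startswith(k, i): return True
def pvHit (text : List Char) : Bool :=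
  match text with
  | [] => false
  | c :: rest =>
    (pvBuckets.getD c []).any (fun k => PySem.Chars.startswith (c :: rest) k) || pvHit rest

def is_ad_parse_alt (parse : Option (List (String × String))) : Bool :=
  match parse with
  | none => true
  | some d =>
    let name := PySem.Chars.lower ((PySem.Dict.mk d).getD "name" "").toList
    let url  := PySem.Chars.lower ((PySem.Dict.mk d).getD "url" "").toList
    pvHit name || pvHit url

-- ===== PRECONDITION & SPEC =====
def Spec_is_ad_parse (parse : Option (List (String × String))) (out : Bool) : Prop := out = is_ad_parse_alt parse
instance (parse : Option (List (String × String))) (out : Bool) : Decidable (Spec_is_ad_parse parse out) := by unfold Spec_is_ad_parse; infer_instance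

-- ===== CLAIM (what is proved, stated in full; the proofs are below) =====
def Claim_equal_is_ad_parse : Prop := ∀ (parse : Option (List (String × String))), Dom_is_ad_parse parse → Spec_is_ad_parse parse (is_ad_parse parse)

-- ===== LEMMAS AND PROOFS =====

-- no keyword is empty (concrete list)
theorem pvKWL_ne_nil : ∀ k ∈ pvKWL, k ≠ [] := by decide

-- the bucket of c holds exactly the lowered keywords whose first char is c
theorem pvBuckets_getD (c : Char) :
    pvBuckets.getD c [] = pvKWL.filter (fun k => k.headI == c) := by
  have h : pvBuckets
      = (pvKWL.map (fun k => (k.headI, k))).foldl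
          (fun d p => d.modify p.1 [] (fun v => v ++ [p.2])) PySem.Dict.empty := by
    simp [pvBuckets, List.foldl_map]
  rw [h, PySem.Dict.getD_foldl_modify_append]
  simp [List.filter_map, List.map_map, Function.comp_def]

-- at each position the bucketed inner loop tries exactly the keywords that can match
theorem pvBucket_any (c : Char) (t : List Char) :
    (pvBuckets.getD c []).any (fun k => PySem.Chars.startswith (c :: t) k)
      = pvKWL.any (fun k => PySem.Chars.startswith (c :: t) k) := by
  rw [pvBuckets_getD, List.any_filter]
  apply Bool.coe_iff_coe.mp
  simp only [List.any_eq_true, Bool.and_eq_true, beq_iff_eq]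
  constructor
  · rintro ⟨k, hk, _, hsw⟩; exact ⟨k, hk, hsw⟩
  · rintro ⟨k, hk, hsw⟩
    refine ⟨k, hk, ?_, hsw⟩
    have hne := pvKWL_ne_nil k hk
    rw [PySem.Chars.startswith_iff] at hsw
    cases k with
    | nil => exact absurd rfl hne
    | cons a k' =>
      rcases hsw with ⟨s, hs⟩
      have : a = c := by
        have := congrArg (fun l => l.head?) hs
        simpa using this
      simp [this]

-- the position scan finds exactly the keywords occurring as an infix
theorem pvHit_iff (text : List Char) :
    pvHit text = true ↔ ∃ k ∈ pvKWL, k <:+: text := by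
  induction text with
  | nil =>
    simp only [pvHit, Bool.false_eq_true, false_iff]
    rintro ⟨k, hk, hinf⟩
    exact pvKWL_ne_nil k hk (List.eq_nil_of_infix_nil hinf)
  | cons c rest ih =>
    simp only [pvHit, Bool.or_eq_true, pvBucket_any, List.any_eq_true,
      PySem.Chars.startswith_iff, ih]
    constructor
    · rintro (⟨k, hk, hp⟩ | ⟨k, hk, hi⟩)
      · exact ⟨k, hk, hp.isInfix⟩
      · exact ⟨k, hk, List.infix_cons_iff.mpr (Or.inr hi)⟩
    · rintro ⟨k, hk, hinf⟩
      rcases List.infix_cons_iff.mp hinf with hp | hi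
      · exact Or.inl ⟨k, hk, hp⟩
      · exact Or.inr ⟨k, hk, hi⟩

-- A's keyword loop as an existential
theorem pvAdLoopA_iff (kws : List String) (name url : List Char) :
    pvAdLoopA kws name url = true
      ↔ ∃ kw ∈ kws, PySem.Chars.lower kw.toList <:+: name ∨ PySem.Chars.lower kw.toList <:+: url := by
  induction kws with
  | nil => simp [pvAdLoopA]
  | cons kw rest ih =>
    simp only [pvAdLoopA]
    split_ifs with h
    · simp only [true_iff]
      have h2 : PySem.Chars.isIn (PySem.Chars.lower kw.toList) name = true
          ∨ PySem.Chars.isIn (PySem.Chars.lower kw.toList) url = true := by simpa using h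
      rcases h2 with h' | h' <;>
        exact ⟨kw, List.mem_cons_self ..,
          by rw [PySem.Chars.isIn_iff_infix] at h'; tauto⟩
    · rw [ih]
      constructor
      · rintro ⟨k, hk, hi⟩; exact ⟨k, List.mem_cons_of_mem _ hk, hi⟩
      · rintro ⟨k, hk, hi⟩
        rcases List.mem_cons.mp hk with rfl | hk'
        · exfalso; apply h
          rcases hi with hi | hi <;>
            simp [PySem.Chars.isIn_iff_infix, hi]
        · exact ⟨k, hk', hi⟩

theorem pvMain (name url : List Char) :
    pvAdLoopA pvADKeywords name url = (pvHit name || pvHit url) := by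
  apply Bool.coe_iff_coe.mp
  rw [pvAdLoopA_iff, Bool.or_eq_true, pvHit_iff, pvHit_iff]
  simp only [pvKWL, List.mem_map]
  constructor
  · rintro ⟨kw, hkw, h | h⟩
    · exact Or.inl ⟨_, ⟨kw, hkw, rfl⟩, h⟩
    · exact Or.inr ⟨_, ⟨kw, hkw, rfl⟩, h⟩
  · rintro (⟨k, ⟨kw, hkw, rfl⟩, h⟩ | ⟨k, ⟨kw, hkw, rfl⟩, h⟩)
    · exact ⟨kw, hkw, Or.inl h⟩
    · exact ⟨kw, hkw, Or.inr h⟩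

-- ===== VERDICT (by name: the statement is the Claim_ definition above) =====
theorem is_ad_parse_spec : Claim_equal_is_ad_parse := by
  intro parse _
  unfold Spec_is_ad_parse is_ad_parse is_ad_parse_alt
  cases parse with
  | none => rfl
  | some d => exact pvMain _ _
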